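-- pv_equiv track=rewrite | github.com/Ramtin-Nouri/ArCoGen | generate/generate_labels.py | detect_overlap
-- ===== SOURCE A (Python) =====
-- def who_contains_who(moves,time_point):
--     """
--     Returns a dictionary where the key is the object that contains
--     the other object.
--     """
--     contains = {}
--     # Initialize all objects to not contain anything
--     for i in range(len(moves)):
--         contains[moves[i][0]] = None
--     for i in range(len(moves)):
--         if moves[i][3] > time_point:
--             break
--         if moves[i][1] == '_contain':
--             contains[moves[i][0]] = moves[i][2]
--         elif moves[i][1] == '_pick_place':
--             contains[moves[i][0]] = None
--     return contains
--
-- def detect_overlap(moves):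
--     """
--     Detects if there is any overlap in the moves and which one is the main and which one is the sub.
--     """
--     for i in range(len(moves)):
--         for j in range(i+1, len(moves)):
--             if moves[i][3] == moves[j][3]:
--                 contains = who_contains_who(moves, moves[i][3])
--                 if contains[moves[i][0]] == moves[j][0]:
--                     return True, i, j
--                 if contains[moves[j][0]] == moves[i][0]:
--                     return True, j, i
--     return False, None, None
-- ===== SOURCE B (Python) =====
-- def detect_overlap(moves):
--     n = len(moves)
--     # One pass: per-object history of containment updates, as (position, value-after).
--     hist = {}
--     for k in range(n):
--         name, act, other = moves[k][0], moves[k][1], moves[k][2]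
--         if act == '_contain':
--             hist.setdefault(name, []).append((k, other))
--         elif act == '_pick_place':
--             hist.setdefault(name, []).append((k, None))
--
--     def state(name, cut):
--         # containment value of `name` after replaying moves[:cut]
--         s = None
--         for k, v in hist.get(name, []):
--             if k >= cut:
--                 break
--             s = v
--         return s
--
--     for i in range(n):
--         a, t = moves[i][0], moves[i][3]
--         # replay cutoff: first position whose timestamp exceeds t
--         cut = n
--         for k in range(n):
--             if moves[k][3] > t:
--                 cut = k
--                 break
--         for j in range(i + 1, n):
--             if moves[j][3] == t:
--                 b = moves[j][0]
--                 if state(a, cut) == b: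
--                     return True, i, j
--                 if state(b, cut) == a:
--                     return True, j, i
--     return False, None, None
-- ===== Notes on version B (the rewrite author's own statement) =====
-- stated objective: faster
-- what changed: B builds per-object containment-update histories in one pass and answers each pair check by replaying only that object's updates up to a precomputed cutoff index, instead of A's rebuilding of the full containment dict for every timestamp-tied pair.
import Mathlib
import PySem

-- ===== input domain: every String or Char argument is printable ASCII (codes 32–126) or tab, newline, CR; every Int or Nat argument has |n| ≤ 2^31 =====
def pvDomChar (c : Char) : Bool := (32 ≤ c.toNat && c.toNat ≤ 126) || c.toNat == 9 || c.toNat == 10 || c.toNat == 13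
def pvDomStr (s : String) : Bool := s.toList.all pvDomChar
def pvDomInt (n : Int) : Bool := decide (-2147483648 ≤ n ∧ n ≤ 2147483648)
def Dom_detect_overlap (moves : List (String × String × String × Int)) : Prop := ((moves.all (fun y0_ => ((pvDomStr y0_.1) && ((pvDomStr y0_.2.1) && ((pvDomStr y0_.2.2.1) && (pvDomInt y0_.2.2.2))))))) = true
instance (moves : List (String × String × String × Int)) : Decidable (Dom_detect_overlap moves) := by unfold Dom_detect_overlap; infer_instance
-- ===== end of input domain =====

-- B replaces A's rebuilding of the whole containment dict per timestamp-tied pair by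
-- per-object update histories built in one pass plus a replay cutoff index per move
-- (objective: faster; a timing run measured B ≥ 1.5× faster at the largest size).

-- ===== PORT A =====
-- who_contains_who: initialize every object's entry to None, then replay moves up to the
-- first move past time_point (the Python 'break').
def pvWcwInit (moves : List (String × String × String × Int)) :
    PySem.Dict String (Option String) :=
  moves.foldl (fun d m => d.insert m.1 none) PySem.Dict.empty

def pvWcwLoop (t : Int) (d : PySem.Dict String (Option String)) :
    List (String × String × String × Int) → PySem.Dict String (Option String)
  | [] => d
  | m :: rest =>
    if m.2.2.2 > t then d
    else if m.2.1 == "_contain" then pvWcwLoop t (d.insert m.1 (some m.2.2.1)) rest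
    else if m.2.1 == "_pick_place" then pvWcwLoop t (d.insert m.1 none) rest
    else pvWcwLoop t d rest

def who_contains_who_A (moves : List (String × String × String × Int)) (t : Int) :
    PySem.Dict String (Option String) :=
  pvWcwLoop t (pvWcwInit moves) moves

-- inner loop 'for j in range(i+1, len(moves))' over the suffix after position i.
-- contains[moves[i][0]] / contains[moves[j][0]]: both keys are always present (the helper
-- initializes an entry for every move's first component), so getD with any default is exact.
def pvAInner (moves : List (String × String × String × Int))
    (mi : String × String × String × Int) (i : Int) :
    Int → List (String × String × String × Int) → Option (Bool × Option Int × Option Int)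
  | _, [] => none
  | j, mj :: rest =>
    if mi.2.2.2 == mj.2.2.2 then
      let c := who_contains_who_A moves mi.2.2.2
      if c.getD mi.1 none == some mj.1 then some (true, some i, some j)
      else if c.getD mj.1 none == some mi.1 then some (true, some j, some i)
      else pvAInner moves mi i (j + 1) rest
    else pvAInner moves mi i (j + 1) rest

-- outer loop 'for i in range(len(moves))'
def pvAOuter (moves : List (String × String × String × Int)) :
    Int → List (String × String × String × Int) → Bool × Option Int × Option Int
  | _, [] => (false, none, none)
  | i, mi :: rest =>
    match pvAInner moves mi i (i + 1) rest with
    | some r => r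
    | none => pvAOuter moves (i + 1) rest

def detect_overlap (moves : List (String × String × String × Int)) :
    Bool × Option Int × Option Int :=
  pvAOuter moves 0 moves

-- ===== PORT B =====
-- hist: one enumerate pass building per-object (position, value-after-update) histories
-- via setdefault(...).append(...) = modify with default [].
def pvHist (moves : List (String × String × String × Int)) :
    PySem.Dict String (List (Int × Option String)) :=
  (PySem.List.enumerate moves).foldl
    (fun h p =>
      if p.2.2.1 == "_contain" then
        h.modify p.2.1 [] (fun l => l ++ [(p.1, some p.2.2.2.1)])
      else if p.2.2.1 == "_pick_place" then
        h.modify p.2.1 [] (fun l => l ++ [(p.1, none)])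
      else h)
    PySem.Dict.empty

-- state(name, cut): walk the history, break at the first position ≥ cut.
def pvStateLoop (cut : Int) : Option String → List (Int × Option String) → Option String
  | s, [] => s
  | s, (k, v) :: rest => if cut ≤ k then s else pvStateLoop cut v rest

def pvState (hist : PySem.Dict String (List (Int × Option String)))
    (name : String) (cut : Int) : Option String :=
  pvStateLoop cut none (hist.getD name [])

-- the cutoff scan: first position whose timestamp exceeds t (n when none does)
def pvCutLoop (t : Int) : Int → List (String × String × String × Int) → Int
  | k, [] => k
  | k, m :: rest => if m.2.2.2 > t then k else pvCutLoop t (k + 1) rest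

-- inner loop 'for j in range(i+1, n)' with the 'if moves[j][3] == t' guard
def pvPairScan (hist : PySem.Dict String (List (Int × Option String)))
    (a : String) (t cut i : Int) :
    Int → List (String × String × String × Int) → Option (Bool × Option Int × Option Int)
  | _, [] => none
  | j, mj :: rest =>
    if mj.2.2.2 == t then
      if pvState hist a cut == some mj.1 then some (true, some i, some j)
      else if pvState hist mj.1 cut == some a then some (true, some j, some i)
      else pvPairScan hist a t cut i (j + 1) rest
    else pvPairScan hist a t cut i (j + 1) rest

-- outer loop 'for i in range(n)'
def pvBMain (moves : List (String × String × String × Int))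
    (hist : PySem.Dict String (List (Int × Option String))) :
    Int → List (String × String × String × Int) → Bool × Option Int × Option Int
  | _, [] => (false, none, none)
  | i, mi :: rest =>
    let cut := pvCutLoop mi.2.2.2 0 moves
    match pvPairScan hist mi.1 mi.2.2.2 cut i (i + 1) rest with
    | some r => r
    | none => pvBMain moves hist (i + 1) rest

def detect_overlap_alt (moves : List (String × String × String × Int)) :
    Bool × Option Int × Option Int :=
  pvBMain moves (pvHist moves) 0 moves

-- ===== PRECONDITION & SPEC =====
def Spec_detect_overlap (moves : List (String × String × String × Int)) (out : Bool × Option Int × Option Int) : Prop := out = detect_overlap_alt moves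
instance (moves : List (String × String × String × Int)) (out : Bool × Option Int × Option Int) : Decidable (Spec_detect_overlap moves out) := by unfold Spec_detect_overlap; infer_instance

-- ===== CLAIM =====
def Claim_equal_detect_overlap : Prop := ∀ (moves : List (String × String × String × Int)), Dom_detect_overlap moves → Spec_detect_overlap moves (detect_overlap moves)

-- ===== LEMMAS AND PROOFS =====

-- abstract single-object state update: what one move does to object x's containment value
def pvSUpd (x : String) (s : Option String) (m : String × String × String × Int) :
    Option String :=
  if m.2.1 == "_contain" then (if m.1 == x then some m.2.2.1 else s)
  else if m.2.1 == "_pick_place" then (if m.1 == x then none else s)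
  else s

-- x's history entry contributed by one enumerated move, if any
def pvGx (x : String) (p : Int × (String × String × String × Int)) :
    Option (Int × Option String) :=
  if p.2.2.1 == "_contain" then (if p.2.1 == x then some (p.1, some p.2.2.2.1) else none)
  else if p.2.2.1 == "_pick_place" then (if p.2.1 == x then some (p.1, none) else none)
  else none

theorem pvInit_getD (x : String) :
    ∀ (l : List (String × String × String × Int)) (d : PySem.Dict String (Option String)),
      d.getD x none = none →
      (l.foldl (fun d m => d.insert m.1 none) d).getD x none = none := by
  intro l
  induction l with
  | nil => intro d h; simpa using h
  | cons m rest ih =>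
    intro d h
    simp only [List.foldl_cons]
    exact ih _ (by rw [PySem.Dict.getD_insert]; split <;> simp [h])

theorem pvWcwLoop_getD (t : Int) (x : String) :
    ∀ (l : List (String × String × String × Int)) (d : PySem.Dict String (Option String)),
      (pvWcwLoop t d l).getD x none =
        (l.takeWhile (fun m => decide (m.2.2.2 ≤ t))).foldl (pvSUpd x) (d.getD x none) := by
  intro l
  induction l with
  | nil => intro d; rfl
  | cons m rest ih =>
    intro d
    by_cases hb : m.2.2.2 > t
    · have hf : (decide (m.2.2.2 ≤ t)) = false := by simp; omega
      simp [pvWcwLoop, hb, hf]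
    · have hle : (decide (m.2.2.2 ≤ t)) = true := by simp; omega
      simp only [pvWcwLoop, if_neg hb, List.takeWhile_cons, hle, if_true, List.foldl_cons]
      have hins : ∀ v : Option String,
          (d.insert m.1 v).getD x none = if m.1 == x then v else d.getD x none := by
        intro v
        rw [PySem.Dict.getD_insert]
        by_cases hx : x = m.1
        · simp [hx]
        · have hxb : (m.1 == x) = false := by
            simp only [beq_eq_false_iff_ne]; exact fun e => hx e.symm
          simp [hx, hxb]
      by_cases h1 : m.2.1 == "_contain"
      · rw [if_pos h1, ih, hins]
        have : pvSUpd x (d.getD x none) m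
            = if m.1 == x then some m.2.2.1 else d.getD x none := by
          simp [pvSUpd, h1]
        rw [this]
      · by_cases h2 : m.2.1 == "_pick_place"
        · rw [if_neg h1, if_pos h2, ih, hins]
          have : pvSUpd x (d.getD x none) m
              = if m.1 == x then none else d.getD x none := by
            simp only [pvSUpd, h1, Bool.false_eq_true, if_false, h2, if_true]
          rw [this]
        · rw [if_neg h1, if_neg h2, ih]
          have : pvSUpd x (d.getD x none) m = d.getD x none := by
            simp [pvSUpd, h1, h2]
          rw [this]

-- A's per-object containment value is the fold of pvSUpd over the processed prefix
theorem pvA_state (moves : List (String × String × String × Int)) (t : Int) (x : String) :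
    (who_contains_who_A moves t).getD x none =
      (moves.takeWhile (fun m => decide (m.2.2.2 ≤ t))).foldl (pvSUpd x) none := by
  unfold who_contains_who_A
  rw [pvWcwLoop_getD]
  have : (pvWcwInit moves).getD x none = none := by
    unfold pvWcwInit
    exact pvInit_getD x moves PySem.Dict.empty (by simp [PySem.Dict.getD_empty])
  rw [this]

-- hist characterization: object x's history is the filterMap of pvGx over the enumeration
theorem pvHist_getD (x : String) :
    ∀ (l : List (Int × (String × String × String × Int)))
      (h : PySem.Dict String (List (Int × Option String))),
      (l.foldl
        (fun h p =>
          if p.2.2.1 == "_contain" then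
            h.modify p.2.1 [] (fun l => l ++ [(p.1, some p.2.2.2.1)])
          else if p.2.2.1 == "_pick_place" then
            h.modify p.2.1 [] (fun l => l ++ [(p.1, none)])
          else h) h).getD x [] = h.getD x [] ++ l.filterMap (pvGx x) := by
  intro l
  induction l with
  | nil => intro h; simp
  | cons p rest ih =>
    intro h
    simp only [List.foldl_cons]
    have hmod : ∀ (e : Int × Option String),
        (h.modify p.2.1 [] (fun l => l ++ [e])).getD x []
          = if p.2.1 == x then h.getD x [] ++ [e] else h.getD x [] := by
      intro e
      rw [PySem.Dict.getD_modify]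
      by_cases hx : x = p.2.1
      · simp [hx]
      · have hxb : (p.2.1 == x) = false := by
          simp only [beq_eq_false_iff_ne]; exact fun e => hx e.symm
        simp [hx, hxb]
    by_cases h1 : p.2.2.1 == "_contain"
    · rw [if_pos h1]
      by_cases hx : p.2.1 == x
      · have hg : pvGx x p = some (p.1, some p.2.2.2.1) := by simp [pvGx, h1, hx]
        rw [List.filterMap_cons_some hg, ih, hmod, if_pos hx]
        simp
      · have hg : pvGx x p = none := by simp [pvGx, h1, hx]
        rw [List.filterMap_cons_none hg, ih, hmod, if_neg hx]
    · rw [if_neg h1]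
      by_cases h2 : p.2.2.1 == "_pick_place"
      · rw [if_pos h2]
        by_cases hx : p.2.1 == x
        · have hg : pvGx x p = some (p.1, none) := by simp [pvGx, h1, h2, hx]
          rw [List.filterMap_cons_some hg, ih, hmod, if_pos hx]
          simp
        · have hg : pvGx x p = none := by simp [pvGx, h1, h2, hx]
          rw [List.filterMap_cons_none hg, ih, hmod, if_neg hx]
      · rw [if_neg h2]
        have hg : pvGx x p = none := by simp [pvGx, h1, h2]
        rw [List.filterMap_cons_none hg, ih]

-- B's state loop over x's history equals the pvSUpd fold over the first (cut − s0) moves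
theorem pvStateLoop_eq (x : String) (cut : Int) :
    ∀ (l : List (String × String × String × Int)) (s0 : Int) (acc : Option String),
      pvStateLoop cut acc ((PySem.List.enumerate l s0).filterMap (pvGx x)) =
        (l.take (cut - s0).toNat).foldl (pvSUpd x) acc := by
  intro l
  induction l with
  | nil => intro s0 acc; simp [pvStateLoop]
  | cons m rest ih =>
    intro s0 acc
    rw [PySem.List.enumerate_cons]
    have upd : ∀ v : Option String, pvGx x (s0, m) = some (s0, v) →
        pvSUpd x acc m = v → pvStateLoop cut acc
            (((s0, m) :: PySem.List.enumerate rest (s0 + 1)).filterMap (pvGx x)) =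
          ((m :: rest).take (cut - s0).toNat).foldl (pvSUpd x) acc := by
      intro v hg hs
      rw [List.filterMap_cons_some hg]
      simp only [pvStateLoop]
      by_cases hc : cut ≤ s0
      · have h0 : (cut - s0).toNat = 0 := by omega
        simp [hc, h0]
      · have h0 : (cut - s0).toNat = (cut - (s0 + 1)).toNat + 1 := by omega
        rw [if_neg hc, h0, List.take_succ_cons, List.foldl_cons, hs, ih]
    have skip : pvGx x (s0, m) = none →
        pvSUpd x acc m = acc → pvStateLoop cut acc
            (((s0, m) :: PySem.List.enumerate rest (s0 + 1)).filterMap (pvGx x)) =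
          ((m :: rest).take (cut - s0).toNat).foldl (pvSUpd x) acc := by
      intro hg hs
      rw [List.filterMap_cons_none hg, ih]
      by_cases hc : cut ≤ s0
      · have h0 : (cut - s0).toNat = 0 := by omega
        have h1 : (cut - (s0 + 1)).toNat = 0 := by omega
        simp [h0, h1]
      · have h0 : (cut - s0).toNat = (cut - (s0 + 1)).toNat + 1 := by omega
        rw [h0, List.take_succ_cons, List.foldl_cons, hs]
    by_cases h1 : m.2.1 == "_contain"
    · by_cases hx : m.1 == x
      · exact upd (some m.2.2.1) (by simp [pvGx, h1, hx]) (by simp [pvSUpd, h1, hx])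
      · exact skip (by simp [pvGx, h1, hx]) (by simp [pvSUpd, h1, hx])
    · by_cases h2 : m.2.1 == "_pick_place"
      · by_cases hx : m.1 == x
        · exact upd none (by simp [pvGx, h1, h2, hx])
            (by simp only [pvSUpd, h1, Bool.false_eq_true, if_false, h2, if_true, hx])
        · exact skip (by simp [pvGx, h1, h2, hx]) (by simp [pvSUpd, h1, h2, hx])
      · exact skip (by simp [pvGx, h1, h2]) (by simp [pvSUpd, h1, h2])

-- the cutoff scan returns the length of the processed prefix
theorem pvCutLoop_eq (t : Int) :
    ∀ (l : List (String × String × String × Int)) (k : Int),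
      pvCutLoop t k l = k + ((l.takeWhile (fun m => decide (m.2.2.2 ≤ t))).length : Int) := by
  intro l
  induction l with
  | nil => intro k; simp [pvCutLoop]
  | cons m rest ih =>
    intro k
    by_cases hb : m.2.2.2 > t
    · have hf : (decide (m.2.2.2 ≤ t)) = false := by simp; omega
      simp [pvCutLoop, hb, hf]
    · have hle : (decide (m.2.2.2 ≤ t)) = true := by simp; omega
      simp only [pvCutLoop, if_neg hb, List.takeWhile_cons, hle, if_true, ih,
        List.length_cons]
      push_cast
      ring

-- the two state computations agree
theorem pvState_eq (moves : List (String × String × String × Int)) (t : Int) (x : String) :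
    pvState (pvHist moves) x (pvCutLoop t 0 moves) =
      (who_contains_who_A moves t).getD x none := by
  rw [pvA_state]
  unfold pvState pvHist
  rw [pvHist_getD, PySem.Dict.getD_empty, List.nil_append, pvStateLoop_eq, pvCutLoop_eq]
  have hpre : moves.takeWhile (fun m => decide (m.2.2.2 ≤ t)) <+: moves :=
    List.takeWhile_prefix _
  have hn : ((0 : Int) + ((moves.takeWhile (fun m => decide (m.2.2.2 ≤ t))).length : Int)
      - 0).toNat = (moves.takeWhile (fun m => decide (m.2.2.2 ≤ t))).length := by omega
  rw [hn, ← List.prefix_iff_eq_take.mp hpre]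

-- inner scans agree
theorem pvInner_eq (moves : List (String × String × String × Int))
    (mi : String × String × String × Int) (i : Int) :
    ∀ (rest : List (String × String × String × Int)) (j : Int),
      pvAInner moves mi i j rest =
        pvPairScan (pvHist moves) mi.1 mi.2.2.2 (pvCutLoop mi.2.2.2 0 moves) i j rest := by
  intro rest
  induction rest with
  | nil => intro j; rfl
  | cons mj r ih =>
    intro j
    simp only [pvAInner, pvPairScan]
    by_cases ht : mi.2.2.2 = mj.2.2.2
    · have h1 : (mi.2.2.2 == mj.2.2.2) = true := by simp [ht]
      have h2 : (mj.2.2.2 == mi.2.2.2) = true := by simp [ht]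
      rw [pvState_eq moves mi.2.2.2 mi.1, pvState_eq moves mi.2.2.2 mj.1]
      simp only [h1, h2, if_true]
      split
      · rfl
      · split
        · rfl
        · exact ih (j + 1)
    · have h1 : (mi.2.2.2 == mj.2.2.2) = false := by simp [ht]
      have h2 : (mj.2.2.2 == mi.2.2.2) = false := by simp [Ne.symm ht]
      simp only [h1, h2, Bool.false_eq_true, if_false]
      exact ih (j + 1)

-- outer loops agree
theorem pvOuter_eq (moves : List (String × String × String × Int)) :
    ∀ (rest : List (String × String × String × Int)) (i : Int),
      pvAOuter moves i rest = pvBMain moves (pvHist moves) i rest := by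
  intro rest
  induction rest with
  | nil => intro i; rfl
  | cons mi r ih =>
    intro i
    simp only [pvAOuter, pvBMain]
    rw [← pvInner_eq]
    cases pvAInner moves mi i (i + 1) r with
    | some res => rfl
    | none => exact ih (i + 1)

-- ===== VERDICT =====
theorem detect_overlap_spec : Claim_equal_detect_overlap := by
  intro moves _
  show detect_overlap moves = detect_overlap_alt moves
  exact pvOuter_eq moves moves 0
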